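-- pv_equiv track=rewrite | github.com/meeadi/Harmonique | utils/music_theory.py | get_possible_triads
-- ===== SOURCE A (Python) =====
-- MAJOR_SCALE = [0, 2, 4, 5, 7, 9, 11]
--
-- MINOR_SCALE = [0, 2, 3, 5, 7, 8, 10]
--
-- CHORD_FORMULAS = { # Useful for for suggesting Triads or detect them
--     'major' : [0, 4, 7,],
--     'minor' : [0, 3, 7],
--     'diminished' : [0, 3, 6]
-- }
--
-- TRIAD_TYPES = {
--     "major" : ['major', 'minor', 'minor', 'major', 'major', 'minor', 'diminished'],
--     "minor" : ['minor', 'diminished', 'major', 'minor', 'minor', 'major', 'major']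
-- }
--
-- def build_scales(root: int, scale_type: str) -> list:
--     if scale_type == 'major':
--         intervals = MAJOR_SCALE
--     elif scale_type == 'minor':
--         intervals = MINOR_SCALE
--     else:
--         raise ValueError(f"Unsupported scale type: {scale_type}")
--
--     return [(root + i) % 12 for i in intervals]
--
-- def get_triad(root_note: int, chord_type: str) -> list:
--     return [(root_note + interval) % 12 for interval in CHORD_FORMULAS[chord_type]]
--
-- def get_possible_triads(key_root: int=60, scale_type: str='major') -> list:
--     scale = build_scales(key_root % 12, scale_type)
--     triads = []
--
--     for i, degree in enumerate(scale):
--         chord_type = TRIAD_TYPES[scale_type][i]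
--         triad = get_triad(degree, chord_type)
--         triads.append(triad)
--
--     return triads
-- ===== SOURCE B (Python) =====
-- MAJOR_SCALE = [0, 2, 4, 5, 7, 9, 11]
--
-- MINOR_SCALE = [0, 2, 3, 5, 7, 8, 10]
--
-- def build_scales(root: int, scale_type: str) -> list:
--     if scale_type == 'major':
--         intervals = MAJOR_SCALE
--     elif scale_type == 'minor':
--         intervals = MINOR_SCALE
--     else:
--         raise ValueError(f"Unsupported scale type: {scale_type}")
--
--     return [(root + i) % 12 for i in intervals]
--
-- def get_possible_triads(key_root: int = 60, scale_type: str = 'major') -> list: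
--     # Stack diatonic thirds from the scale itself: no chord-type tables needed.
--     scale = build_scales(key_root % 12, scale_type)
--     return [[scale[i], scale[(i + 2) % 7], scale[(i + 4) % 7]] for i in range(7)]
-- ===== Notes on version B (the rewrite author's own statement) =====
-- stated objective: simpler
-- what changed: B drops the CHORD_FORMULAS/TRIAD_TYPES lookup tables and builds each diatonic triad by stacking thirds from the scale itself (scale[i], scale[(i+2)%7], scale[(i+4)%7]), instead of classifying each degree and re-deriving intervals from its root.
import Mathlib
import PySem

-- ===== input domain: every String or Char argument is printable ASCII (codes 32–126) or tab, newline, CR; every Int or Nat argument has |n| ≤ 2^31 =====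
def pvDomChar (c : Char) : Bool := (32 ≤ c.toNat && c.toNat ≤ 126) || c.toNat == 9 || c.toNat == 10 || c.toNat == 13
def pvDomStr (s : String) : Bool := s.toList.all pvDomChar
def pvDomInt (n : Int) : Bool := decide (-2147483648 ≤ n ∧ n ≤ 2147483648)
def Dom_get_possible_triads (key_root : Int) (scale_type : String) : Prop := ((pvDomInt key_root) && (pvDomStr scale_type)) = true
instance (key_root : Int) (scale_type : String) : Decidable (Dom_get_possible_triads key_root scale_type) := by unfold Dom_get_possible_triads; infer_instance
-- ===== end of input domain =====

-- B replaces the CHORD_FORMULAS/TRIAD_TYPES tables by stacking diatonic thirds directly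
-- from the scale (scale[i], scale[(i+2)%7], scale[(i+4)%7]); same return value, simpler.

-- ===== PORT A =====
def MAJOR_SCALE : List Int := [0, 2, 4, 5, 7, 9, 11]
def MINOR_SCALE : List Int := [0, 2, 3, 5, 7, 8, 10]

def CHORD_FORMULAS : PySem.Dict String (List Int) := PySem.Dict.ofList
  [("major", [0, 4, 7]), ("minor", [0, 3, 7]), ("diminished", [0, 3, 6])]

def TRIAD_TYPES : PySem.Dict String (List String) := PySem.Dict.ofList
  [("major", ["major", "minor", "minor", "major", "major", "minor", "diminished"]),
   ("minor", ["minor", "diminished", "major", "minor", "minor", "major", "major"])]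

-- returns none where the Python raises ValueError
def build_scales (root : Int) (scale_type : String) : Option (List Int) :=
  if scale_type = "major" then
    some (MAJOR_SCALE.map (fun i => PySem.Int.mod (root + i) 12))
  else if scale_type = "minor" then
    some (MINOR_SCALE.map (fun i => PySem.Int.mod (root + i) 12))
  else
    none

-- CHORD_FORMULAS[chord_type]: the key is always present at every call site (getD [] unreachable)
def get_triad (root_note : Int) (chord_type : String) : List Int :=
  (PySem.Dict.getD CHORD_FORMULAS chord_type []).map
    (fun interval => PySem.Int.mod (root_note + interval) 12)

def get_possible_triads (key_root : Int) (scale_type : String) : List (List Int) :=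
  match build_scales (PySem.Int.mod key_root 12) scale_type with
  | none => []  -- unreachable under Pre_ (Python raises ValueError here)
  | some scale =>
    (PySem.List.enumerate scale 0).foldl
      (fun triads (p : Int × Int) =>
        -- TRIAD_TYPES[scale_type][i]: both lookups always succeed here
        let chord_type := ((PySem.List.pyGet? (PySem.Dict.getD TRIAD_TYPES scale_type []) p.1).getD "")
        triads ++ [get_triad p.2 chord_type])
      []

-- ===== PORT B =====
def build_scales_B (root : Int) (scale_type : String) : Option (List Int) :=
  if scale_type = "major" then
    some (MAJOR_SCALE.map (fun i => PySem.Int.mod (root + i) 12))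
  else if scale_type = "minor" then
    some (MINOR_SCALE.map (fun i => PySem.Int.mod (root + i) 12))
  else
    none

def get_possible_triads_alt (key_root : Int) (scale_type : String) : List (List Int) :=
  match build_scales_B (PySem.Int.mod key_root 12) scale_type with
  | none => []  -- unreachable under Pre_ (Python raises ValueError here)
  | some scale =>
    (PySem.List.pyRange 0 7 1).map (fun i =>
      -- indices are always in range for the 7-note scale
      [(PySem.List.pyGet? scale i).getD 0,
       (PySem.List.pyGet? scale (PySem.Int.mod (i + 2) 7)).getD 0,
       (PySem.List.pyGet? scale (PySem.Int.mod (i + 4) 7)).getD 0])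

-- ===== PRECONDITION & SPEC =====
-- Pre_ excludes exactly the scale types on which the Python A raises ValueError (B raises too).
def Pre_get_possible_triads (key_root : Int) (scale_type : String) : Prop :=
  scale_type = "major" ∨ scale_type = "minor"
instance (key_root : Int) (scale_type : String) : Decidable (Pre_get_possible_triads key_root scale_type) := by
  unfold Pre_get_possible_triads; infer_instance

def pvWitness_get_possible_triads : Int × String := (60, "major")

def Spec_get_possible_triads (key_root : Int) (scale_type : String) (out : List (List Int)) : Prop := out = get_possible_triads_alt key_root scale_type
instance (key_root : Int) (scale_type : String) (out : List (List Int)) : Decidable (Spec_get_possible_triads key_root scale_type out) := by unfold Spec_get_possible_triads; infer_instance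

-- ===== CLAIM (what is proved, stated in full; the proofs are below) =====
def Claim_equal_get_possible_triads : Prop := ∀ (key_root : Int) (scale_type : String), Dom_get_possible_triads key_root scale_type → Pre_get_possible_triads key_root scale_type → Spec_get_possible_triads key_root scale_type (get_possible_triads key_root scale_type)

-- ===== LEMMAS AND PROOFS =====
lemma pvTriadTypes_major : PySem.Dict.getD TRIAD_TYPES "major" [] =
    ["major", "minor", "minor", "major", "major", "minor", "diminished"] := by decide

lemma pvTriadTypes_minor : PySem.Dict.getD TRIAD_TYPES "minor" [] =
    ["minor", "diminished", "major", "minor", "minor", "major", "major"] := by decide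

lemma pvFormula_major : PySem.Dict.getD CHORD_FORMULAS "major" [] = [0, 4, 7] := by decide
lemma pvFormula_minor : PySem.Dict.getD CHORD_FORMULAS "minor" [] = [0, 3, 7] := by decide
lemma pvFormula_dim : PySem.Dict.getD CHORD_FORMULAS "diminished" [] = [0, 3, 6] := by decide

lemma pvRange7 : PySem.List.pyRange 0 7 1 = [0, 1, 2, 3, 4, 5, 6] := by decide

-- ===== VERDICT (by name: the statement is the Claim_ definition above) =====
theorem get_possible_triads_spec : Claim_equal_get_possible_triads := by
  intro key_root scale_type _ hpre
  unfold Spec_get_possible_triads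
  rcases hpre with h | h <;> subst h <;>
    simp only [get_possible_triads, get_possible_triads_alt, build_scales, build_scales_B,
      get_triad, MAJOR_SCALE, MINOR_SCALE, PySem.Int.mod, pvRange7,
      reduceIte, List.map, PySem.List.enumerate_cons, PySem.List.enumerate_nil,
      pvTriadTypes_major, pvTriadTypes_minor, List.foldl] <;>
    simp [PySem.List.pyGet?, PySem.List.pyIdx?, pvFormula_major, pvFormula_minor, pvFormula_dim,
      Int.fmod_eq_emod] <;>
    omega
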